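-- pv_equiv track=rewrite | github.com/18h32n/shockabo | tests/integration/test_advanced_dsl_config.py | create_square_object
-- ===== SOURCE A (Python) =====
-- def create_square_object(size: int, color: int = 1, background: int = 0) -> list[list[int]]:
--     """Create a square object for testing."""
--     grid_size = size + 4  # Add padding
--     grid = [[background for _ in range(grid_size)] for _ in range(grid_size)]
--
--     start = 2
--     for i in range(start, start + size):
--         for j in range(start, start + size):
--             grid[i][j] = color
--
--     return grid
-- ===== SOURCE B (Python) =====
-- def create_square_object(size: int, color: int = 1, background: int = 0) -> list[list[int]]:
--     """Create a square object for testing."""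
--     grid_size = size + 4  # Add padding
--     grid = []
--     for i in range(grid_size):
--         if 2 <= i < 2 + size:
--             grid.append([background] * 2 + [color] * size + [background] * 2)
--         else:
--             grid.append([background] * grid_size)
--     return grid
-- ===== Notes on version B (the rewrite author's own statement) =====
-- stated objective: simpler
-- what changed: Builds the grid in one row-by-row pass, writing each row once by list multiplication/concatenation, instead of allocating an all-background grid and then overwriting the inner square with a nested index-mutation loop.
import Mathlib
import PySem

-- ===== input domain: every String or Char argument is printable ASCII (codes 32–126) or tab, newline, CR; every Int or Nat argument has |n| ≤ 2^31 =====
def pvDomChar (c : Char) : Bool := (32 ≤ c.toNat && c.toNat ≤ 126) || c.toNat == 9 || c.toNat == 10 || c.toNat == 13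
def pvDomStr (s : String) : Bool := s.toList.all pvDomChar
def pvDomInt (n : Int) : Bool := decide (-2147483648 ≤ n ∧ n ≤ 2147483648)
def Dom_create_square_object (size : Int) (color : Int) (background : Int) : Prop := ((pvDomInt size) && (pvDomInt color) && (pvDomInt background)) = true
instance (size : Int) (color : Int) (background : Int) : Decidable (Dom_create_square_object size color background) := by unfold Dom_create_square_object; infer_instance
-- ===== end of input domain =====

-- B builds the grid in one row-by-row pass (each row written once) instead of A's
-- allocate-all-background-then-overwrite-the-inner-square; objective: simpler.

-- ===== PORT A =====
def create_square_object (size : Int) (color : Int) (background : Int) : List (List Int) :=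
  let grid_size := size + 4
  let grid := (PySem.List.pyRange 0 grid_size 1).map (fun _ =>
    (PySem.List.pyRange 0 grid_size 1).map (fun _ => background))
  let start : Int := 2
  (PySem.List.pyRange start (start + size) 1).foldl (fun g i =>
    (PySem.List.pyRange start (start + size) 1).foldl (fun g j =>
      -- grid[i][j] = color : indices i, j are always in range here
      g.set i.toNat ((g.getD i.toNat []).set j.toNat color)) g) grid

-- ===== PORT B =====
def create_square_object_alt (size : Int) (color : Int) (background : Int) : List (List Int) :=
  let grid_size := size + 4
  (PySem.List.pyRange 0 grid_size 1).map (fun i =>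
    if 2 ≤ i ∧ i < 2 + size then
      List.replicate 2 background ++ List.replicate size.toNat color ++ List.replicate 2 background
    else
      List.replicate grid_size.toNat background)

-- ===== PRECONDITION & SPEC =====
def Spec_create_square_object (size : Int) (color : Int) (background : Int) (out : List (List Int)) : Prop := out = create_square_object_alt size color background
instance (size : Int) (color : Int) (background : Int) (out : List (List Int)) : Decidable (Spec_create_square_object size color background out) := by unfold Spec_create_square_object; infer_instance

-- ===== CLAIM (what is proved, stated in full; the proofs are below) =====
def Claim_equal_create_square_object : Prop := ∀ (size : Int) (color : Int) (background : Int), Dom_create_square_object size color background → Spec_create_square_object size color background (create_square_object size color background)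


-- ===== LEMMAS AND PROOFS =====

-- Folding in-range "set index i to F (current value at i)" over indices [s, s+k) of an
-- all-r0 list paints exactly the middle block with F r0 (each index is touched once).
theorem pv_foldl_set_block {α : Type} (F : α → α) (d r0 : α) :
    ∀ (k s rest : ℕ),
      (List.range' s k).foldl (fun l i => l.set i (F (l.getD i d))) (List.replicate (s + k + rest) r0)
      = List.replicate s r0 ++ List.replicate k (F r0) ++ List.replicate rest r0 := by
  intro k
  induction k with
  | zero =>
      intro s rest
      simp [List.replicate_append_replicate]
  | succ k ih =>
      intro s rest
      have hsplit : List.range' s (k + 1) = List.range' s k ++ [s + k] := by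
        simpa using List.range'_concat (s := s) (n := k) (step := 1)
      have hinit : s + (k + 1) + rest = s + k + (rest + 1) := by omega
      rw [hsplit, List.foldl_append, hinit, ih s (rest + 1)]
      have hgetD : (List.replicate s r0 ++ List.replicate k (F r0) ++ List.replicate (rest + 1) r0).getD (s + k) d = r0 := by
        rw [List.getD_eq_getElem?_getD, List.getElem?_append_right (by simp)]
        simp
      simp only [List.foldl_cons, List.foldl_nil, hgetD]
      have h1 : (List.replicate (rest + 1) r0).set 0 (F r0) = F r0 :: List.replicate rest r0 := by
        simp [List.replicate_succ]
      rw [List.append_assoc, List.set_append, if_neg (by simp)]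
      simp only [List.length_replicate, Nat.add_sub_cancel_left]
      rw [List.set_append, if_neg (by simp)]
      simp only [List.length_replicate, Nat.sub_self]
      rw [h1, show List.replicate (k + 1) (F r0) = List.replicate k (F r0) ++ [F r0] from List.replicate_succ']
      simp [List.append_assoc]

-- a single inner pass "row[j] = color for j in [2,2+js)" collapses to setting the whole row once
theorem pv_inner_fold (color : Int) (js : List ℕ) :
    ∀ (g : List (List Int)) (i : ℕ), i < g.length →
      js.foldl (fun g j => g.set i ((g.getD i []).set j color)) g
      = g.set i (js.foldl (fun r j => r.set j color) (g.getD i [])) := by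
  induction js with
  | nil =>
      intro g i h
      simp only [List.foldl_nil]
      rw [List.getD_eq_getElem _ _ h, List.set_getElem_self]
  | cons j js ih =>
      intro g i h
      simp only [List.foldl_cons]
      rw [ih _ i (by simpa using h)]
      rw [List.set_set]
      congr 1
      rw [List.getD_eq_getElem _ _ (by simpa using h), List.getElem_set_self (by simpa using h),
          List.getD_eq_getElem _ _ h]

-- an out-of-range row index leaves the grid unchanged at every step
theorem pv_foldl_oob (color : Int) (i : ℕ) (js : List ℕ) :
    ∀ g : List (List Int), g.length ≤ i →
      js.foldl (fun g j => g.set i ((g.getD i []).set j color)) g = g := by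
  induction js with
  | nil => intro g _; rfl
  | cons j js ih =>
      intro g h
      simp only [List.foldl_cons]
      rw [List.set_eq_of_length_le h]
      exact ih g h

-- congruence for foldl when the two step functions agree on all states of a fixed length
theorem pv_foldl_step_congr (js : List ℕ) (f f' : List (List Int) → ℕ → List (List Int)) (L : ℕ)
    (hpres : ∀ g i, g.length = L → (f' g i).length = L)
    (heq : ∀ g i, g.length = L → f g i = f' g i) :
    ∀ g, g.length = L → js.foldl f g = js.foldl f' g := by
  induction js with
  | nil => intro g _; rfl
  | cons j js ih =>
      intro g hg
      simp only [List.foldl_cons]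
      rw [heq g j hg]
      exact ih _ (hpres g j hg)

-- the all-background row of length n+4
def pvRow (n : ℕ) (bg : Int) : List Int := List.replicate (n + 4) bg

-- the painted row
def pvBand (n : ℕ) (c bg : Int) : List Int :=
  List.replicate 2 bg ++ List.replicate n c ++ List.replicate 2 bg

theorem pv_inner (n : ℕ) (c bg : Int) :
    (List.range' 2 n).foldl (fun (r : List Int) j => r.set j c) (pvRow n bg) = pvBand n c bg := by
  have h := pv_foldl_set_block (fun _ : Int => c) (0 : Int) bg n 2 2
  rw [pvRow, pvBand, (by omega : n + 4 = 2 + n + 2)]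
  exact h

theorem pv_canon_A (size color background : Int) (hs : 0 ≤ size) :
    create_square_object size color background
      = List.replicate 2 (pvRow size.toNat background)
        ++ List.replicate size.toNat (pvBand size.toNat color background)
        ++ List.replicate 2 (pvRow size.toNat background) := by
  set n := size.toNat with hn
  have hsz : size = (n : Int) := by omega
  unfold create_square_object
  simp only [hsz]
  have hlen4 : (((n : Int) + 4) - 0).toNat = n + 4 := by omega
  have hlenn : ((2 + (n : Int)) - 2).toNat = n := by omega
  have hrow : (PySem.List.pyRange 0 ((n : Int) + 4) 1).map (fun _ => background) = pvRow n background := by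
    rw [List.map_const', PySem.List.length_pyRange_one, hlen4, pvRow]
  rw [hrow]
  have hgrid : (PySem.List.pyRange 0 ((n : Int) + 4) 1).map (fun _ => pvRow n background)
      = List.replicate (n + 4) (pvRow n background) := by
    rw [List.map_const', PySem.List.length_pyRange_one, hlen4]
  rw [hgrid]
  have hrange : PySem.List.pyRange 2 (2 + (n : Int)) 1 = (List.range' 2 n).map (fun k => (Nat.cast k : Int)) := by
    rw [PySem.List.pyRange_one, hlenn, List.range'_eq_map_range, List.map_map]
    refine List.map_congr_left (fun k hk => ?_)
    simp [Function.comp]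
  rw [hrange, List.foldl_map]
  simp only [List.foldl_map, Int.toNat_natCast]
  have hstep := pv_foldl_step_congr (List.range' 2 n)
      (fun g i => (List.range' 2 n).foldl (fun g j => g.set i ((g.getD i []).set j color)) g)
      (fun g i => g.set i ((fun r : List Int => (List.range' 2 n).foldl (fun r j => r.set j color) r) (g.getD i [])))
      (n + 4)
      (fun g i hg => by simpa using hg)
      (fun g i hg => by
        by_cases hi : i < g.length
        · exact pv_inner_fold color (List.range' 2 n) g i hi
        · exact (pv_foldl_oob color i (List.range' 2 n) g (by omega)).trans
            (List.set_eq_of_length_le (by omega)).symm)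
      (List.replicate (n + 4) (pvRow n background)) (by simp)
  rw [hstep]
  have hblock := pv_foldl_set_block
      (fun r : List Int => (List.range' 2 n).foldl (fun r j => r.set j color) r)
      ([] : List Int) (pvRow n background) n 2 2
  rw [(by omega : n + 4 = 2 + n + 2), hblock, pv_inner]

theorem pv_canon_B (size color background : Int) (hs : 0 ≤ size) :
    create_square_object_alt size color background
      = List.replicate 2 (pvRow size.toNat background)
        ++ List.replicate size.toNat (pvBand size.toNat color background)
        ++ List.replicate 2 (pvRow size.toNat background) := by
  set n := size.toNat with hn
  have hsz : size = (n : Int) := by omega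
  unfold create_square_object_alt
  simp only [hsz]
  have hlen4 : (((n : Int) + 4) - 0).toNat = n + 4 := by omega
  rw [PySem.List.pyRange_one, hlen4, List.map_map, List.range_eq_range']
  have e1 : List.range' 0 2 ++ List.range' 2 n = List.range' 0 (2 + n) := by
    simpa using List.range'_append (s := 0) (m := 2) (n := n) (step := 1)
  have e2 : List.range' 0 (2 + n) ++ List.range' (2 + n) 2 = List.range' 0 (2 + n + 2) := by
    simpa using List.range'_append (s := 0) (m := 2 + n) (n := 2) (step := 1)
  have hsplit : List.range' 0 (n + 4) = (List.range' 0 2 ++ List.range' 2 n) ++ List.range' (2 + n) 2 := by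
    rw [e1, e2]
    congr 1
    omega
  rw [hsplit, List.map_append, List.map_append]
  have hlow : ∀ i ∈ List.range' 0 2,
      ((fun i => if 2 ≤ i ∧ i < 2 + (n : Int) then
          List.replicate 2 background ++ List.replicate ((n : Int)).toNat color ++ List.replicate 2 background
        else List.replicate (((n : Int) + 4)).toNat background) ∘ (fun k : ℕ => 0 + (Nat.cast k : Int))) i
      = pvRow n background := by
    intro i hi
    have hb := List.mem_range'_1.mp hi
    simp only [Function.comp]
    rw [if_neg (by omega), (by omega : (((n : Int) + 4)).toNat = n + 4)]
    rfl
  have hmid : ∀ i ∈ List.range' 2 n,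
      ((fun i => if 2 ≤ i ∧ i < 2 + (n : Int) then
          List.replicate 2 background ++ List.replicate ((n : Int)).toNat color ++ List.replicate 2 background
        else List.replicate (((n : Int) + 4)).toNat background) ∘ (fun k : ℕ => 0 + (Nat.cast k : Int))) i
      = pvBand n color background := by
    intro i hi
    have hb := List.mem_range'_1.mp hi
    simp only [Function.comp]
    rw [if_pos (by constructor <;> omega), (by omega : (((n : Int))).toNat = n)]
    rfl
  have hhigh : ∀ i ∈ List.range' (2 + n) 2,
      ((fun i => if 2 ≤ i ∧ i < 2 + (n : Int) then
          List.replicate 2 background ++ List.replicate ((n : Int)).toNat color ++ List.replicate 2 background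
        else List.replicate (((n : Int) + 4)).toNat background) ∘ (fun k : ℕ => 0 + (Nat.cast k : Int))) i
      = pvRow n background := by
    intro i hi
    have hb := List.mem_range'_1.mp hi
    simp only [Function.comp]
    rw [if_neg (by omega), (by omega : (((n : Int) + 4)).toNat = n + 4)]
    rfl
  rw [List.map_congr_left hlow, List.map_congr_left hmid, List.map_congr_left hhigh,
      List.map_const', List.map_const', List.map_const',
      List.length_range', List.length_range', List.length_range']

theorem pv_neg (size color background : Int) (hs : size < 0) :
    create_square_object size color background = create_square_object_alt size color background := by
  simp only [create_square_object, create_square_object_alt]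
  rw [PySem.List.pyRange_one_eq_nil (by omega : 2 + size ≤ (2 : Int))]
  simp only [List.foldl_nil]
  have hc : ∀ i ∈ PySem.List.pyRange 0 (size + 4) 1,
      (if 2 ≤ i ∧ i < 2 + size then
          List.replicate 2 background ++ List.replicate size.toNat color ++ List.replicate 2 background
        else List.replicate (size + 4).toNat background)
      = List.replicate (size + 4).toNat background := by
    intro i hi
    have hb := PySem.List.mem_pyRange_one.mp hi
    rw [if_neg (by omega)]
  rw [List.map_congr_left hc]
  have hrow : (PySem.List.pyRange 0 (size + 4) 1).map (fun _ => background)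
      = List.replicate (size + 4).toNat background := by
    rw [List.map_const', PySem.List.length_pyRange_one]
    congr 1
    omega
  rw [hrow]

-- ===== VERDICT (by name: the statement is the Claim_ definition above) =====
theorem create_square_object_spec : Claim_equal_create_square_object := by
  intro size color background _
  unfold Spec_create_square_object
  rcases lt_or_ge size 0 with h | h
  · exact pv_neg size color background h
  · rw [pv_canon_A size color background h, pv_canon_B size color background h]
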